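-- pv_equiv track=rewrite | github.com/MrBrantCode/unitest_baseline | mut_generate/mist_train_taco/taco_2607/solution.py | reduce_pyramid
-- ===== SOURCE A (Python) =====
-- def reduce_pyramid(base):
--     def comb_n(n):
--         c = 1
--         for k in range(0, n + 1):
--             yield c
--             c = c * (n - k) // (k + 1)
--
--     from operator import mul
--     return sum(map(mul, base, comb_n(len(base) - 1)))
-- ===== SOURCE B (Python) =====
-- def reduce_pyramid(base):
--     row = list(base)
--     if not row:
--         return 0
--     while len(row) > 1:
--         row = [a + b for a, b in zip(row, row[1:])]
--     return row[0]
-- ===== Notes on version B (the rewrite author's own statement) =====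
-- stated objective: alternative
-- what changed: Replaces the single binomial-weighted pass (coefficients produced by an incremental C(n,k) generator) with the classic Pascal pyramid reduction: repeatedly replace the row by its list of adjacent pairwise sums until one element remains.
import Mathlib
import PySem

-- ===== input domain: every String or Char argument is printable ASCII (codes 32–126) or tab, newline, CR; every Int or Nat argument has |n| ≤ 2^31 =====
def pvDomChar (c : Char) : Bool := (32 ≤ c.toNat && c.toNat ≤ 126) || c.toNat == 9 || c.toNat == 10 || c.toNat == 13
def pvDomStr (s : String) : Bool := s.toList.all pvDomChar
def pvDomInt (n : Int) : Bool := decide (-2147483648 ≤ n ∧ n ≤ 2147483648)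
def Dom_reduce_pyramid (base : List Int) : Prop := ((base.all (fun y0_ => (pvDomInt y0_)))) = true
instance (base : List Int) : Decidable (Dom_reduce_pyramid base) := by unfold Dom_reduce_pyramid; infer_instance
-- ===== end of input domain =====

-- B replaces A's binomial-coefficient weighted sum (coefficients from an incremental
-- generator) by the Pascal pyramid reduction: repeated adjacent pairwise sums.

-- ===== PORT A =====
-- sum(map(mul, base, comb_n(len(base)-1))): the generator's yields are materialised as a
-- list (state = (c, values yielded so far)); map(mul, …) truncates at the shorter = zipWith.
def reduce_pyramid (base : List Int) : Int :=
  let n : Int := PySem.List.len base - 1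
  let comb : List Int :=
    ((PySem.List.pyRange 0 (n + 1) 1).foldl
      (fun (st : Int × List Int) k =>
        (PySem.Int.floordiv (st.1 * (n - k)) (k + 1), st.2 ++ [st.1]))
      (1, [])).2
  (List.zipWith (· * ·) base comb).sum

-- ===== PORT B =====
-- [a + b for a, b in zip(row, row[1:])]
def altStep (row : List Int) : List Int :=
  (row.zip (row.drop 1)).map (fun p => p.1 + p.2)

-- while len(row) > 1: row = altStep row
def altLoop (row : List Int) : List Int :=
  if 1 < row.length then altLoop (altStep row) else row
  termination_by row.length
  decreasing_by
    simp [altStep, List.length_map, List.length_zip]; omega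

def reduce_pyramid_alt (base : List Int) : Int :=
  match base with
  | [] => 0
  | _ => (altLoop base).headD 0   -- row[0] of the final row (the loop keeps row nonempty)

-- ===== PRECONDITION & SPEC =====
def Spec_reduce_pyramid (base : List Int) (out : Int) : Prop := out = reduce_pyramid_alt base
instance (base : List Int) (out : Int) : Decidable (Spec_reduce_pyramid base out) := by unfold Spec_reduce_pyramid; infer_instance

-- ===== CLAIM (what is proved, stated in full; the proofs are below) =====
def Claim_equal_reduce_pyramid : Prop := ∀ (base : List Int), Dom_reduce_pyramid base → Spec_reduce_pyramid base (reduce_pyramid base)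

-- ===== LEMMAS AND PROOFS =====

-- the row of binomial coefficients C(n,0) … C(n,n), as integers
def binomC (n : Nat) : List Int := (List.range (n + 1)).map (fun k => (n.choose k : Int))

lemma length_binomC (n : Nat) : (binomC n).length = n + 1 := by simp [binomC]

lemma getElem_binomC_pad (n i : Nat) (hi : i < n + 2) :
    (binomC n ++ [0])[i]'(by simp [binomC]; omega) = ((n.choose i : Nat) : Int) := by
  by_cases h : i < n + 1
  · rw [List.getElem_append_left (by simp [binomC]; omega)]
    simp [binomC]
  · have h' : i = n + 1 := by omega
    subst h'
    rw [List.getElem_append_right (by simp [binomC])]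
    simp [binomC, Nat.choose_succ_self]

-- Pascal's rule in list form
lemma binomC_succ (n : Nat) :
    binomC (n + 1) = List.zipWith (· + ·) (binomC n ++ [0]) (0 :: binomC n) := by
  apply List.ext_getElem
  · simp [binomC]
  · intro i h1 h2
    have hi : i < n + 2 := by simp [binomC] at h1; omega
    rw [List.getElem_zipWith]
    rw [getElem_binomC_pad n i hi]
    match i, hi with
    | 0, _ =>
      simp [binomC]
    | j + 1, hj =>
      have hjn : j < n + 1 := by omega
      rw [List.getElem_cons_succ]
      have hb : (binomC n)[j]'(by simp [binomC]; omega) = ((n.choose j : Nat) : Int) := by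
        simp [binomC]
      rw [hb]
      have hc : (binomC (n + 1))[j + 1]'(by simp [binomC]; omega)
          = (((n + 1).choose (j + 1) : Nat) : Int) := by
        simp [binomC]
      rw [hc, Nat.choose_succ_succ']
      push_cast; ring

lemma sum_zipWith_add_left (u v w : List Int) (hu : w.length ≤ u.length) (hv : w.length ≤ v.length) :
    (List.zipWith (· * ·) (List.zipWith (· + ·) u v) w).sum
      = (List.zipWith (· * ·) u w).sum + (List.zipWith (· * ·) v w).sum := by
  induction w generalizing u v with
  | nil => simp
  | cons c w ih =>
    match u, v with
    | a :: u, b :: v =>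
      simp only [List.zipWith_cons_cons, List.sum_cons]
      rw [ih u v (by simpa using hu) (by simpa using hv)]
      ring

lemma sum_zipWith_add_right (u v w : List Int) (hvw : v.length = w.length) :
    (List.zipWith (· * ·) u (List.zipWith (· + ·) v w)).sum
      = (List.zipWith (· * ·) u v).sum + (List.zipWith (· * ·) u w).sum := by
  induction u generalizing v w with
  | nil => simp
  | cons a u ih =>
    match v, w with
    | [], [] => simp
    | b :: v, c :: w =>
      simp only [List.zipWith_cons_cons, List.sum_cons]
      rw [ih v w (by simpa using hvw)]
      ring
    | [], _ :: _ => simp at hvw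
    | _ :: _, [] => simp at hvw

lemma sum_zipWith_append_zero (u b : List Int) :
    (List.zipWith (· * ·) u (b ++ [0])).sum = (List.zipWith (· * ·) u b).sum := by
  induction u generalizing b with
  | nil => simp
  | cons a u ih =>
    match b with
    | [] => simp
    | c :: b => simp only [List.cons_append, List.zipWith_cons_cons, List.sum_cons, ih]

lemma altStep_eq (row : List Int) : altStep row = List.zipWith (· + ·) row (row.drop 1) := by
  simp [altStep, List.zip]

-- the pyramid computes the binomial-weighted sum
lemma altLoop_eq (n : Nat) : ∀ row : List Int, row.length = n + 1 →
    (altLoop row).headD 0 = (List.zipWith (· * ·) row (binomC n)).sum := by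
  induction n with
  | zero =>
    intro row h
    match row with
    | [x] =>
      rw [altLoop]
      simp [binomC]
  | succ n ih =>
    intro row h
    match row with
    | a :: rest =>
      have hrest : rest.length = n + 1 := by simpa using h
      rw [altLoop]
      rw [if_pos (by simp [hrest])]
      have hstep : altStep (a :: rest) = List.zipWith (· + ·) (a :: rest) rest := by
        rw [altStep_eq]; rfl
      have hlen : (altStep (a :: rest)).length = n + 1 := by
        simp [altStep, List.length_zip]; omega
      rw [ih _ hlen, hstep]
      rw [sum_zipWith_add_left _ _ _ (by simp [length_binomC]; omega) (by simp [length_binomC, hrest])]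
      rw [binomC_succ]
      rw [sum_zipWith_add_right _ _ _ (by simp [length_binomC])]
      rw [sum_zipWith_append_zero]
      have hcons : (List.zipWith (· * ·) (a :: rest) (0 :: binomC n)).sum
          = (List.zipWith (· * ·) rest (binomC n)).sum := by
        simp
      rw [hcons]

-- generator invariant: starting from c = C(n,j), the iterations j, j+1, … yield C(n,j), C(n,j+1), …
lemma comb_fold (n d : Nat) : ∀ (j : Nat) (acc : List Int), j + d = n + 1 →
    ((List.range' j d).foldl
      (fun (st : Int × List Int) (k : Nat) =>
        (PySem.Int.floordiv (st.1 * ((n : Int) - (k : Int))) ((k : Int) + 1), st.2 ++ [st.1]))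
      ((n.choose j : Int), acc)).2
    = acc ++ (List.range' j d).map (fun k => ((n.choose k : Nat) : Int)) := by
  induction d with
  | zero => intro j acc h; simp
  | succ d ih =>
    intro j acc h
    rw [List.range'_succ]
    simp only [List.foldl_cons, List.map_cons]
    have hstep : PySem.Int.floordiv ((n.choose j : Int) * ((n : Int) - (j : Int))) ((j : Int) + 1)
        = ((n.choose (j + 1) : Nat) : Int) := by
      have hjn : j ≤ n := by omega
      have hsub : (n : Int) - (j : Int) = ((n - j : Nat) : Int) := by omega
      have h2 : ((n.choose j : Nat) : Int) * ((n - j : Nat) : Int)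
          = ((n.choose j * (n - j) : Nat) : Int) := by push_cast; ring
      have h3 : ((j : Int) + 1) = ((j + 1 : Nat) : Int) := by push_cast; ring
      rw [hsub, h2, h3, PySem.Int.floordiv_natCast]
      congr 1
      rw [← Nat.choose_succ_right_eq]
      exact Nat.mul_div_cancel _ (by omega)
    rw [hstep]
    rw [ih (j + 1) (acc ++ [(n.choose j : Int)]) (by omega)]
    simp

-- A computes the binomial-weighted sum
lemma reduce_pyramid_eq_weighted (base : List Int) (m : Nat) (h : base.length = m + 1) :
    reduce_pyramid base = (List.zipWith (· * ·) base (binomC m)).sum := by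
  have hn : PySem.List.len base - 1 = (m : Int) := by
    simp [PySem.List.len_eq, h]
  simp only [reduce_pyramid, hn]
  rw [PySem.List.pyRange_one]
  have hto : ((m : Int) + 1 - 0).toNat = m + 1 := by omega
  rw [hto, List.foldl_map]
  have hrange : List.range (m + 1) = List.range' 0 (m + 1) := List.range_eq_range'
  rw [hrange]
  have hfold := comb_fold m (m + 1) 0 [] (by omega)
  simp only [Nat.choose_zero_right, Nat.cast_one] at hfold
  have hfun : (fun (st : Int × List Int) (k : Nat) =>
        (PySem.Int.floordiv (st.1 * ((m : Int) - (0 + (k : Int)))) ((0 + (k : Int)) + 1), st.2 ++ [st.1]))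
      = (fun (st : Int × List Int) (k : Nat) =>
        (PySem.Int.floordiv (st.1 * ((m : Int) - (k : Int))) ((k : Int) + 1), st.2 ++ [st.1])) := by
    funext st k; simp
  rw [hfun, hfold]
  congr 1
  simp [binomC, hrange]

-- ===== VERDICT (by name: the statement is the Claim_ definition above) =====
theorem reduce_pyramid_spec : Claim_equal_reduce_pyramid := by
  intro base _
  unfold Spec_reduce_pyramid
  match base with
  | [] => simp [reduce_pyramid, reduce_pyramid_alt, PySem.List.len, PySem.List.pyRange_one_eq_nil]
  | x :: xs =>
      have hlen : (x :: xs).length = xs.length + 1 := by simp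
      rw [reduce_pyramid_eq_weighted _ xs.length hlen]
      show _ = reduce_pyramid_alt (x :: xs)
      unfold reduce_pyramid_alt
      rw [altLoop_eq xs.length (x :: xs) hlen]
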